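-- pv_equiv track=rewrite | github.com/satyam8254/Python-program | python-code/bothX.py | bothCountX
-- ===== SOURCE A (Python) =====
-- from collections import Counter
--
-- def bothCountX(string1, string2, x):
--     # Complete this function, and return the list of resultant characters in sorted order
--     s1=Counter(string1.lower())
--     s2=Counter(string2.lower())
--     res=[]
--     for i in s1:
--         if s1[i]==s2[i]==x:
--             res.append(i)
--     return (sorted(res))
-- ===== SOURCE B (Python) =====
-- def bothCountX(string1, string2, x):
--     # A character must occur at least once to have count x in both strings,
--     # so only x >= 1 can ever produce results.
--     if x < 1:
--         return []
--     s1 = string1.lower()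
--     s2 = string2.lower()
--     res = []
--     for code in range(128):
--         ch = chr(code)
--         if s1.count(ch) == x and s2.count(ch) == x:
--             res.append(ch)
--     return res
-- ===== Notes on version B (the rewrite author's own statement) =====
-- stated objective: alternative
-- what changed: B drops the Counter/sort machinery entirely: it scans the fixed ASCII alphabet in code order and keeps each character whose str.count in both lowercased strings equals x, emitting the result already sorted with no counting tables and no final sort.
import Mathlib
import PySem

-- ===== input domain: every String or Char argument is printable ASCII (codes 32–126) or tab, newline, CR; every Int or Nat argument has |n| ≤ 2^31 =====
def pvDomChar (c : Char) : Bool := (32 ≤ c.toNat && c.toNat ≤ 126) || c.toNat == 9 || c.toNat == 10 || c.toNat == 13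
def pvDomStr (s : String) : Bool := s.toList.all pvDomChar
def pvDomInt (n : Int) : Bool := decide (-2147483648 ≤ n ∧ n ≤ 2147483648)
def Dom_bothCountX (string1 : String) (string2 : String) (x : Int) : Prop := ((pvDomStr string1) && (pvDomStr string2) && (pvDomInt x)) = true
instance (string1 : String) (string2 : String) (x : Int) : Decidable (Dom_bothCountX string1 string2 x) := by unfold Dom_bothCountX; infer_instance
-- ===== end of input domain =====

-- B drops A's Counter-and-sort machinery: it scans the fixed ASCII alphabet in code
-- order and keeps each char with str.count equal to x in both lowered strings,
-- producing the result already sorted (alternative decomposition; same purpose).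

-- ===== PORT A =====
-- 1-char Python strings (the counters' keys) are modelled as Char; the final
-- sorted list of 1-char strings is the sorted list of chars, rendered as strings.
def bothCountX (string1 : String) (string2 : String) (x : Int) : List String :=
  let s1 := PySem.Dict.counter (PySem.Str.lower string1).toList
  let s2 := PySem.Dict.counter (PySem.Str.lower string2).toList
  let res := s1.keys.foldl
    (fun res i => if s1.getD i 0 == x && s2.getD i 0 == x then res ++ [i] else res) []
  (PySem.List.sorted res (fun c => c) false).map (fun c => String.ofList [c])

-- ===== PORT B =====
def bothCountX_alt (string1 : String) (string2 : String) (x : Int) : List String :=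
  if x < 1 then []
  else
    let s1 := PySem.Str.lower string1
    let s2 := PySem.Str.lower string2
    (PySem.List.pyRange 0 128 1).foldl
      (fun res code =>
        let ch := Char.ofNat code.toNat
        if (PySem.Str.count s1 (String.ofList [ch]) : Int) == x
            && (PySem.Str.count s2 (String.ofList [ch]) : Int) == x
        then res ++ [String.ofList [ch]] else res) []

-- ===== PRECONDITION & SPEC =====
def Spec_bothCountX (string1 : String) (string2 : String) (x : Int) (out : List String) : Prop := out = bothCountX_alt string1 string2 x
instance (string1 : String) (string2 : String) (x : Int) (out : List String) : Decidable (Spec_bothCountX string1 string2 x out) := by unfold Spec_bothCountX; infer_instance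

-- ===== CLAIM =====
def Claim_equal_bothCountX : Prop := ∀ (string1 : String) (string2 : String) (x : Int), Dom_bothCountX string1 string2 x → Spec_bothCountX string1 string2 x (bothCountX string1 string2 x)

-- ===== LEMMAS AND PROOFS =====

-- Python's s.count(ch) for a single character ch is the character count.
lemma count_go_single (c : Char) : ∀ (l : List Char) (fuel acc : Nat), l.length ≤ fuel →
    PySem.Chars.count.go [c] fuel l acc = acc + l.count c := by
  intro l
  induction l with
  | nil => intro fuel acc _; cases fuel <;> simp [PySem.Chars.count.go]
  | cons h t ih =>
    intro fuel acc hf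
    cases fuel with
    | zero => simp at hf
    | succ f =>
      by_cases hc : h = c
      · subst hc
        simp only [PySem.Chars.count.go]
        rw [if_pos (by simp [List.isPrefixOf]),
          show List.drop ([h].length) (h :: t) = t by simp,
          ih f (acc + 1) (by simpa using hf), List.count_cons_self]
        omega
      · simp only [PySem.Chars.count.go]
        rw [if_neg (by simp [List.isPrefixOf]; exact fun h' => hc h'.symm),
          ih f acc (by simpa using hf), List.count_cons_of_ne hc]

lemma count_single (l : List Char) (c : Char) :
    PySem.Chars.count l [c] = l.count c := by
  simpa using count_go_single c l l.length 0 le_rfl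

lemma toNat_ofNat_valid (n : Nat) (h : n.isValidChar) : (Char.ofNat n).toNat = n := by
  simp [Char.ofNat, h, Char.ofNatAux, Char.toNat]

def pvAlphabet : List Char := (List.range 128).map Char.ofNat

set_option maxRecDepth 10000 in
lemma pvAlphabet_pairwise : pvAlphabet.Pairwise (· < ·) := by decide

set_option maxRecDepth 10000 in
lemma pvAlphabet_nodup : pvAlphabet.Nodup := by decide

lemma mem_pvAlphabet (c : Char) (h : c.toNat < 128) : c ∈ pvAlphabet := by
  simp only [pvAlphabet, List.mem_map]
  exact ⟨c.toNat, List.mem_range.mpr h, Char.ofNat_toNat c⟩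

-- chars of a Dom string stay below 128 after .lower()
lemma lower_lt_128 (s : String) (hs : pvDomStr s = true) :
    ∀ c ∈ (PySem.Str.lower s).toList, c.toNat < 128 := by
  intro c hc
  rw [PySem.Str.toList_lower] at hc
  simp only [PySem.Chars.lower, List.mem_map] at hc
  obtain ⟨d, hd, hdc⟩ := hc
  have hdom : pvDomChar d = true := by
    simp only [pvDomStr, List.all_eq_true] at hs
    exact hs d hd
  simp only [pvDomChar, Bool.or_eq_true, Bool.and_eq_true, decide_eq_true_eq, beq_iff_eq] at hdom
  subst hdc
  simp only [PySem.Chars.lowerChar, PySem.Chars.isupper]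
  split_ifs with h
  · simp only [Bool.and_eq_true, decide_eq_true_eq, Char.le_def,
      UInt32.le_iff_toNat_le] at h
    have h90 : d.toNat ≤ 90 := h.2
    rw [toNat_ofNat_valid _ (Or.inl (by omega))]
    omega
  · omega

-- the core: A's sorted filtered-keys list IS B's alphabet scan
lemma main_eq (l1 l2 : List Char) (x : Int)
    (h1 : ∀ c ∈ l1, c.toNat < 128) (hx : 1 ≤ x) :
    PySem.List.sorted
      ((PySem.Set.ofList l1).filter
        (fun c => ((l1.count c : Int) == x) && ((l2.count c : Int) == x))) (fun c => c) false
    = pvAlphabet.filter (fun c => ((l1.count c : Int) == x) && ((l2.count c : Int) == x)) := by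
  set P : Char → Bool := fun c => ((l1.count c : Int) == x) && ((l2.count c : Int) == x) with hP
  apply PySem.List.sorted_id_eq_of_perm_of_pairwise
  · apply List.perm_of_nodup_nodup_toFinset_eq
    · exact pvAlphabet_nodup.filter P
    · exact (PySem.Set.nodup_ofList l1).filter P
    · ext c
      simp only [List.toFinset_filter, Finset.mem_filter, List.mem_toFinset, PySem.Set.mem_ofList]
      constructor
      · rintro ⟨-, hp⟩
        refine ⟨?_, hp⟩
        have : (l1.count c : Int) = x := by
          have := (Bool.and_eq_true _ _).mp hp |>.1
          exact_mod_cast (beq_iff_eq).mp this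
        have : 0 < l1.count c := by omega
        exact List.count_pos_iff.mp this
      · rintro ⟨hm, hp⟩
        exact ⟨mem_pvAlphabet c (h1 c hm), hp⟩
  · exact (pvAlphabet_pairwise.filter P).imp le_of_lt

-- x < 1 makes A's result empty: every counted key has count ≥ 1
lemma a_empty_of_lt_one (l1 l2 : List Char) (x : Int) (hx : x < 1) :
    ((PySem.Set.ofList l1).filter
      (fun c => ((l1.count c : Int) == x) && ((l2.count c : Int) == x))) = [] := by
  rw [List.filter_eq_nil_iff]
  intro c hc
  have hm : c ∈ l1 := (PySem.Set.mem_ofList l1 c).mp hc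
  have : 0 < l1.count c := List.count_pos_iff.mpr hm
  simp only [Bool.and_eq_true, beq_iff_eq, not_and]
  intro h
  omega

-- A's pre-sort foldl is the filter of the counter's keys
lemma a_foldl_eq (l1 l2 : List Char) (x : Int) :
    (PySem.Dict.counter l1).keys.foldl
      (fun res i => if (PySem.Dict.counter l1).getD i 0 == x && (PySem.Dict.counter l2).getD i 0 == x then res ++ [i] else res) []
    = (PySem.Set.ofList l1).filter
        (fun c => ((l1.count c : Int) == x) && ((l2.count c : Int) == x)) := by
  rw [PySem.List.foldl_append_if
      (p := fun i => ((PySem.Dict.counter l1).getD i 0 == x && (PySem.Dict.counter l2).getD i 0 == x))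
      (f := fun i => i) ((PySem.Dict.counter l1).keys) []]
  simp [PySem.Dict.keys_counter, PySem.Dict.getD_counter]

-- B's foldl is the filtered alphabet rendered as strings
lemma b_foldl_eq (l1 l2 : List Char) (x : Int)
    (hc1 : ∀ c, PySem.Chars.count l1 [c] = l1.count c)
    (hc2 : ∀ c, PySem.Chars.count l2 [c] = l2.count c) :
    (PySem.List.pyRange 0 128 1).foldl
      (fun res code =>
        if (PySem.Chars.count l1 [Char.ofNat code.toNat] : Int) == x
            && (PySem.Chars.count l2 [Char.ofNat code.toNat] : Int) == x
        then res ++ [String.ofList [Char.ofNat code.toNat]] else res) []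
    = (pvAlphabet.filter (fun c => ((l1.count c : Int) == x) && ((l2.count c : Int) == x))).map
        (fun c => String.ofList [c]) := by
  rw [PySem.List.foldl_append_if
      (p := fun code => ((PySem.Chars.count l1 [Char.ofNat code.toNat] : Int) == x
            && (PySem.Chars.count l2 [Char.ofNat code.toNat] : Int) == x))
      (f := fun code => String.ofList [Char.ofNat code.toNat]) (PySem.List.pyRange 0 128 1) []]
  rw [PySem.List.pyRange_one]
  simp [List.filter_map, List.map_map, pvAlphabet, Function.comp_def, hc1, hc2]

-- ===== VERDICT =====
theorem bothCountX_spec : Claim_equal_bothCountX := by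
  intro string1 string2 x hdom
  unfold Spec_bothCountX bothCountX bothCountX_alt
  have hd1 : pvDomStr string1 = true := by
    unfold Dom_bothCountX at hdom; simp only [Bool.and_eq_true] at hdom; exact hdom.1.1
  simp only []
  rw [a_foldl_eq]
  by_cases hx : x < 1
  · rw [if_pos hx, a_empty_of_lt_one _ _ _ hx]
    rfl
  · rw [if_neg hx]
    simp only [PySem.Str.count_eq, String.toList_ofList]
    rw [b_foldl_eq _ _ x (fun c => count_single _ c) (fun c => count_single _ c),
      main_eq _ _ x (lower_lt_128 string1 hd1) (by omega)]
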